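-- pv_equiv track=rewrite | github.com/binit92/practice_and_notes | amazon_oa/set8.py | maximumHealth
-- ===== SOURCE A (Python) =====
-- def maximumHealth (power, armor):
--     health = 0
--     armour_used = False
--     for val in power:
--         if val >= armor and not armour_used:
--             health += val-armor
--             armour_used = True
--         else:
--             health += val
--
--     if not armour_used :
--         maximum_power = max(power)
--         health -= maximum_power
--         armour_used = True
--
--     return health + 1
-- ===== SOURCE B (Python) =====
-- def maximumHealth(power, armor):
--     # A qualifying hit (val >= armor) exists iff max(power) >= armor,
--     # and then min(armor, max(power)) == armor; otherwise it equals max(power).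
--     return sum(power) - min(armor, max(power)) + 1
-- ===== Notes on version B (the rewrite author's own statement) =====
-- stated objective: simpler
-- what changed: Replaces the stateful flagged loop by the branch-free closed formula sum(power) - min(armor, max(power)) + 1, using that a qualifying hit exists iff max(power) >= armor.
-- outside the precondition, e.g. on maximumHealth([], 5): A raises ValueError, B raises ValueError
import Mathlib
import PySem

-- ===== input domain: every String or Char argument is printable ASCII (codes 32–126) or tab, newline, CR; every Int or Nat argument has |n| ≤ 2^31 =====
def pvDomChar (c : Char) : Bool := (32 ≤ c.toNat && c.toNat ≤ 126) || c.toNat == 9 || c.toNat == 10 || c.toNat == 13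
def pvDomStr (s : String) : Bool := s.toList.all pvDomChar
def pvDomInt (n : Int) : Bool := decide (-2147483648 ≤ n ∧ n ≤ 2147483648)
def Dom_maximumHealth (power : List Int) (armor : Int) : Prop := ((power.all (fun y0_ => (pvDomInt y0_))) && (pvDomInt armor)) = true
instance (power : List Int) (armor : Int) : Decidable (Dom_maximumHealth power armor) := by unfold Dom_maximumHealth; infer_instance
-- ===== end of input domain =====

-- B replaces A's stateful flagged loop by the branch-free closed formula sum - min(armor, max) + 1; objective: simpler.

-- ===== PORT A =====
-- A's loop body (the if/else inside A's for-loop), named so the fold lemmas can cite it.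
def mhStep (armor : Int) (st : Int × Bool) (val : Int) : Int × Bool :=
  if val ≥ armor ∧ st.2 = false then (st.1 + (val - armor), true)
  else (st.1 + val, st.2)

-- loop state: (health, armour_used); max(power) → PySem.List.max? (first maximal element),
-- .getD 0 is never reached under Pre_ (power ≠ []).
def maximumHealth (power : List Int) (armor : Int) : Int :=
  let s := power.foldl (mhStep armor) (0, false)
  let health := if s.2 = false then s.1 - ((PySem.List.max? power (fun x => x)).getD 0) else s.1
  health + 1

-- ===== PORT B =====
def maximumHealth_alt (power : List Int) (armor : Int) : Int :=
  power.sum - min armor (((PySem.List.max? power (fun x => x)).getD 0)) + 1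

-- ===== PRECONDITION & SPEC =====
-- Pre_ excludes the empty list, on which A raises ValueError from max([]) (B raises the same way).
def Pre_maximumHealth (power : List Int) (armor : Int) : Prop := power ≠ []
instance (power : List Int) (armor : Int) : Decidable (Pre_maximumHealth power armor) := by unfold Pre_maximumHealth; infer_instance
def pvWitness_maximumHealth : List Int × Int := ([3, 1], 2)

def Spec_maximumHealth (power : List Int) (armor : Int) (out : Int) : Prop := out = maximumHealth_alt power armor
instance (power : List Int) (armor : Int) (out : Int) : Decidable (Spec_maximumHealth power armor out) := by unfold Spec_maximumHealth; infer_instance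

-- ===== CLAIM (what is proved, stated in full; the proofs are below) =====
def Claim_equal_maximumHealth : Prop := ∀ (power : List Int) (armor : Int), Dom_maximumHealth power armor → Pre_maximumHealth power armor → Spec_maximumHealth power armor (maximumHealth power armor)

-- ===== LEMMAS AND PROOFS =====

theorem mhFold_true (armor : Int) (l : List Int) (h : Int) :
    l.foldl (mhStep armor) (h, true) = (h + l.sum, true) := by
  induction l generalizing h with
  | nil => simp
  | cons x xs ih =>
      simp [mhStep, List.foldl_cons, ih]
      ring

theorem mhFold_false (armor : Int) (l : List Int) (h : Int) :
    l.foldl (mhStep armor) (h, false) =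
      (h + l.sum - (if l.any (fun val => val ≥ armor) then armor else 0),
       l.any (fun val => val ≥ armor)) := by
  induction l generalizing h with
  | nil => simp
  | cons x xs ih =>
      by_cases hx : x ≥ armor
      · simp [mhStep, hx, mhFold_true]
        ring
      · simp [mhStep, hx, ih]
        ring

-- a qualifying hit exists iff the list maximum is ≥ armor
theorem any_iff_max (armor : Int) (power : List Int) (m : Int)
    (hm : PySem.List.max? power (fun x => x) = some m) :
    power.any (fun val => val ≥ armor) = true ↔ armor ≤ m := by
  constructor
  · intro h
    rcases List.any_eq_true.mp h with ⟨v, hv, hva⟩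
    exact le_trans (by exact_mod_cast of_decide_eq_true hva) (PySem.List.max?_isMax hm v hv)
  · intro h
    exact List.any_eq_true.mpr ⟨m, PySem.List.max?_mem hm, decide_eq_true h⟩

-- ===== VERDICT (by name: the statement is the Claim_ definition above) =====
theorem maximumHealth_spec : Claim_equal_maximumHealth := by
  intro power armor _ hne
  unfold Spec_maximumHealth maximumHealth maximumHealth_alt
  obtain ⟨m, hm⟩ : ∃ m, PySem.List.max? power (fun x => x) = some m := by
    cases hmm : PySem.List.max? power (fun x => x) with
    | none => exact absurd ((PySem.List.max?_eq_none_iff _ _).mp hmm) hne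
    | some m => exact ⟨m, rfl⟩
  rw [mhFold_false, hm]
  by_cases hany : power.any (fun val => val ≥ armor)
  · have := (any_iff_max armor power m hm).mp hany
    simp [hany, min_eq_left this]
  · have : ¬ armor ≤ m := fun h => hany ((any_iff_max armor power m hm).mpr h)
    simp [hany, min_eq_right (le_of_not_ge this)]
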